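-- pv_equiv track=rewrite | github.com/Vikr-182/PostQL-Data-Analytics | apriori.py | iter2
-- ===== SOURCE A (Python) =====
-- import itertools
-- from collections import defaultdict
--
-- def def_value():
--     return 0
--
-- def iter2(final1,records,thresh):
--     candidates = {}
--     final = defaultdict(def_value)
--     listf = [x[0] for x in final1]
--     for i in itertools.combinations(listf,2):
--         candidates[tuple(sorted(list(i)))] = 0
--
--         for j in records :
--             if set(i).issubset(set(j)):
--                 candidates[tuple(sorted(list(i)))]+=1
--
--     for key,value in candidates.items():
--         if value >= thresh:
--             final[key] = value
--
--     return final
-- ===== SOURCE B (Python) =====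
-- import itertools
--
-- def iter2(final1, records, thresh):
--     # Precompute, per item, the set of record indices containing it; pair support
--     # is then an index-set intersection instead of a scan over all records per pair.
--     listf = [x[0] for x in final1]
--     rec_sets = [set(r) for r in records]
--     occ = {}
--     for item in listf:
--         if item not in occ:
--             occ[item] = {idx for idx, s in enumerate(rec_sets) if item in s}
--     out = {}
--     for a, b in itertools.combinations(listf, 2):
--         key = (min(a, b), max(a, b))
--         cnt = len(occ[a] & occ[b])
--         if cnt >= thresh:
--             out[key] = cnt
--     return out
-- ===== Notes on version B (the rewrite author's own statement) =====
-- stated objective: faster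
-- what changed: Instead of re-scanning all records (building two Python sets per record) for every candidate pair, B precomputes each record as a set once and builds a per-item map to the set of record indices containing it, so each pair's support is a single index-set intersection.
-- outside the precondition, e.g. on iter2([[]], [], 0): A raises IndexError, B raises IndexError
import Mathlib
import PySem

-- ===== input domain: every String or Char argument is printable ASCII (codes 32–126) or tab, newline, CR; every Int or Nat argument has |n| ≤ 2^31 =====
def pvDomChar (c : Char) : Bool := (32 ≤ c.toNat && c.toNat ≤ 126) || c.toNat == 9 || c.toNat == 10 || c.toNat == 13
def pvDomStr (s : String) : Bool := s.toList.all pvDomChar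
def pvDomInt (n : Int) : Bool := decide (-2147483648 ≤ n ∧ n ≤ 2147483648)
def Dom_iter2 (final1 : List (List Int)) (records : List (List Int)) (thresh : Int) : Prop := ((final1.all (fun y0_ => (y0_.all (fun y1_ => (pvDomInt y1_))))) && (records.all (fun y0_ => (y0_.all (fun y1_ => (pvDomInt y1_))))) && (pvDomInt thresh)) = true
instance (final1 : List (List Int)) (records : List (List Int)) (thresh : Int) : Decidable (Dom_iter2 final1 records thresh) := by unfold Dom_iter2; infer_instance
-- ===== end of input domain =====

-- B replaces A's per-pair scan over all records (building two Python sets per record per pair)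
-- by precomputed per-item record-index sets, so pair support is one index-set intersection: measurably faster.

-- ===== PORT A =====
def iter2 (final1 : List (List Int)) (records : List (List Int)) (thresh : Int) : List (List Int × Int) :=
  -- listf = [x[0] for x in final1]; x[0] ported as headD 0 (exact under Pre_: no empty row)
  let listf := final1.map (fun x => x.headD 0)
  let candidates := (PySem.List.combinations listf 2).foldl
    (fun (cand : PySem.Dict (List Int) Int) i =>
      let key := PySem.List.sorted i (fun x => x) false
      records.foldl
        (fun cand j =>
          if PySem.Set.issubset (PySem.Set.ofList i) (PySem.Set.ofList j) then
            cand.modify key 0 (· + 1)     -- candidates[key] += 1 (key was just set, always present)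
          else cand)
        (cand.insert key 0))
    PySem.Dict.empty
  let final := candidates.items.foldl
    (fun (fin : PySem.Dict (List Int) Int) kv =>
      if kv.2 ≥ thresh then fin.insert kv.1 kv.2 else fin)
    PySem.Dict.empty
  final.items

-- ===== PORT B =====
def iter2_alt (final1 : List (List Int)) (records : List (List Int)) (thresh : Int) : List (List Int × Int) :=
  let listf := final1.map (fun x => x.headD 0)
  let recSets := records.map (fun r => PySem.Set.ofList r)
  -- occ[item] = {idx for idx, s in enumerate(rec_sets) if item in s}: the comprehension over
  -- enumerate yields distinct indices in order, a valid PySem.Set; only len(∩) is consumed, order-independent.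
  let occ := listf.foldl
    (fun (occ : PySem.Dict Int (PySem.Set Int)) item =>
      if occ.contains item then occ
      else occ.insert item
        (((PySem.List.enumerate recSets).filter (fun p => p.2.contains item)).map (fun p => p.1)))
    PySem.Dict.empty
  let out := (PySem.List.combinations listf 2).foldl
    (fun (out : PySem.Dict (List Int) Int) i =>
      match i with
      | [a, b] =>
        let key := [min a b, max a b]
        let cnt : Int := ((PySem.Set.inter (occ.getD a []) (occ.getD b [])).length : Int)
        if cnt ≥ thresh then out.insert key cnt else out
      | _ => out)  -- unreachable: combinations … 2 yields two-element lists
    PySem.Dict.empty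
  out.items

-- ===== PRECONDITION & SPEC =====
-- Pre_ excludes final1 containing an empty row: there Python A raises IndexError on x[0] (B raises too).
def Pre_iter2 (final1 : List (List Int)) (records : List (List Int)) (thresh : Int) : Prop :=
  ∀ x ∈ final1, x ≠ []
instance (final1 : List (List Int)) (records : List (List Int)) (thresh : Int) : Decidable (Pre_iter2 final1 records thresh) := by unfold Pre_iter2; infer_instance
def pvWitness_iter2 : List (List Int) × List (List Int) × Int := ([[1], [2], [3]], [[1, 2], [2, 3], [1, 2, 3]], 2)
def Spec_iter2 (final1 : List (List Int)) (records : List (List Int)) (thresh : Int) (out : List (List Int × Int)) : Prop := out = iter2_alt final1 records thresh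
instance (final1 : List (List Int)) (records : List (List Int)) (thresh : Int) (out : List (List Int × Int)) : Decidable (Spec_iter2 final1 records thresh out) := by unfold Spec_iter2; infer_instance

-- ===== CLAIM (what is proved, stated in full; the proofs are below) =====
def Claim_equal_iter2 : Prop := ∀ (final1 : List (List Int)) (records : List (List Int)) (thresh : Int), Dom_iter2 final1 records thresh → Pre_iter2 final1 records thresh → Spec_iter2 final1 records thresh (iter2 final1 records thresh)

-- ===== LEMMAS AND PROOFS =====

theorem lem_modify_insert {κ : Type} [BEq κ] [LawfulBEq κ] (d : PySem.Dict κ Int) (k : κ) (v : Int) (f : Int → Int) :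
    (d.insert k v).modify k 0 f = d.insert k (f v) := by
  unfold PySem.Dict.modify
  simp [PySem.Dict.getD_insert_self, PySem.Dict.insert_insert_self]

theorem lem_inner {κ α : Type} [BEq κ] [LawfulBEq κ] (l : List α) (d : PySem.Dict κ Int) (k : κ) (v : Int) :
    l.foldl (fun c (_ : α) => c.modify k 0 (· + 1)) (d.insert k v) = d.insert k (v + l.length) := by
  induction l generalizing v with
  | nil => simp
  | cons h t ih =>
    simp only [List.foldl_cons, lem_modify_insert, ih, List.length_cons]
    congr 1; push_cast; ring

theorem lem_fold_insert_getD {κ : Type} [BEq κ] [LawfulBEq κ] [DecidableEq κ] (ks : List κ) (f : κ → Int)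
    (d : PySem.Dict κ Int) (k0 : κ) (dflt : Int) :
    (ks.foldl (fun d k => d.insert k (f k)) d).getD k0 dflt = if k0 ∈ ks then f k0 else d.getD k0 dflt := by
  induction ks generalizing d with
  | nil => simp
  | cons h t ih =>
    simp only [List.foldl_cons, ih, PySem.Dict.getD_insert, List.mem_cons]
    by_cases h1 : k0 ∈ t <;> by_cases h2 : k0 = h <;> simp [h1, h2]

theorem lem_H {κ : Type} [BEq κ] [LawfulBEq κ] [DecidableEq κ] (ks : List κ) (f : κ → Int) :
    (ks.foldl (fun d k => d.insert k (f k)) PySem.Dict.empty).items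
      = (PySem.Set.ofList ks).map (fun k => (k, f k)) := by
  have hkeys : (ks.foldl (fun d k => d.insert k (f k)) PySem.Dict.empty).keys = PySem.Set.ofList ks := by
    have := PySem.Dict.keys_foldl_insert ks (fun _ k => f k) PySem.Dict.empty
    simpa [PySem.Set.update_nil_left] using this
  have hnd : (ks.foldl (fun d k => d.insert k (f k)) PySem.Dict.empty).keys.Nodup := by
    rw [hkeys]; exact PySem.Set.nodup_ofList ks
  rw [PySem.Dict.items_eq_map_keys _ hnd 0, hkeys]
  refine List.map_congr_left (fun k hk => ?_)
  rw [lem_fold_insert_getD]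
  simp [(PySem.Set.mem_ofList ks k).mp hk]

theorem lem_add_filter {κ : Type} [BEq κ] [LawfulBEq κ] [DecidableEq κ] (p : κ → Bool) (xs : List κ) (s : List κ) :
    (xs.foldl PySem.Set.add s).filter p = (xs.filter p).foldl PySem.Set.add (s.filter p) := by
  induction xs generalizing s with
  | nil => simp
  | cons h t ih =>
    have hadd : ∀ (u : List κ) (x : κ), x ∈ u → PySem.Set.add u x = u := by
      intro u x hx; simp [PySem.Set.add, hx]
    have hadd' : ∀ (u : List κ) (x : κ), x ∉ u → PySem.Set.add u x = u ++ [x] := by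
      intro u x hx; simp [PySem.Set.add, hx]
    simp only [List.foldl_cons, List.filter_cons]
    by_cases hm : h ∈ s <;> by_cases hp : p h
    · rw [hadd s h hm, ih, if_pos hp, List.foldl_cons,
        hadd (s.filter p) h (List.mem_filter.mpr ⟨hm, hp⟩)]
    · rw [hadd s h hm, ih, if_neg (by simp [hp])]
    · rw [hadd' s h hm, ih, if_pos hp, List.foldl_cons,
        hadd' (s.filter p) h (fun hc => hm (List.mem_filter.mp hc).1)]
      congr 1
      simp [List.filter_append, hp]
    · rw [hadd' s h hm, ih, if_neg (by simp [hp])]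
      congr 1
      simp [List.filter_append, hp]

theorem lem_ofList_filter {κ : Type} [BEq κ] [LawfulBEq κ] [DecidableEq κ] (p : κ → Bool) (xs : List κ) :
    (PySem.Set.ofList xs).filter p = PySem.Set.ofList (xs.filter p) := by
  rw [PySem.Set.ofList_eq_foldl, PySem.Set.ofList_eq_foldl, lem_add_filter]
  simp

theorem lem_pair {α : Type} (xs : List α) (i : List α) (h : i ∈ PySem.List.combinations xs 2) :
    ∃ a b, i = [a, b] ∧ a ∈ xs ∧ b ∈ xs := by
  rw [PySem.List.mem_combinations_iff] at h
  obtain ⟨hsub, hlen⟩ := h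
  match i, hlen with
  | [a, b], _ =>
    exact ⟨a, b, rfl, hsub.mem (by simp), hsub.mem (by simp)⟩

theorem lem_sorted_pair (a b : Int) :
    PySem.List.sorted [a, b] (fun x => x) false = [min a b, max a b] := by
  apply PySem.List.sorted_id_eq_of_perm_of_pairwise
  · rcases le_total a b with h | h
    · simp [min_eq_left h, max_eq_right h]
    · rw [min_eq_right h, max_eq_left h]
      exact List.Perm.swap a b []
  · simp

theorem lem_all_pair (a b : Int) (j : List Int) :
    [min a b, max a b].all (fun x => decide (x ∈ j)) = (decide (a ∈ j) && decide (b ∈ j)) := by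
  rcases le_total a b with h | h
  · simp [min_eq_left h, max_eq_right h]
  · rw [min_eq_right h, max_eq_left h]
    simp [Bool.and_comm]

theorem lem_issubset (a b : Int) (j : List Int) :
    PySem.Set.issubset (PySem.Set.ofList [a, b]) (PySem.Set.ofList j) = (decide (a ∈ j) && decide (b ∈ j)) := by
  have h1 : PySem.Set.issubset (PySem.Set.ofList [a, b]) (PySem.Set.ofList j) = true ↔ (a ∈ j ∧ b ∈ j) := by
    rw [PySem.Set.issubset_iff]
    constructor
    · intro h
      exact ⟨by simpa [PySem.Set.mem_ofList] using h a (by simp [PySem.Set.mem_ofList]),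
             by simpa [PySem.Set.mem_ofList] using h b (by simp [PySem.Set.mem_ofList])⟩
    · rintro ⟨ha, hb⟩ x hx
      rw [PySem.Set.mem_ofList] at hx
      simp only [List.mem_cons, List.not_mem_nil, or_false] at hx
      rcases hx with rfl | rfl <;> simp [PySem.Set.mem_ofList, ha, hb]
  rw [Bool.eq_iff_iff]
  simp [h1]

-- occ lookup characterization
theorem lem_occ (g : Int → PySem.Set Int) (xs : List Int) (o : PySem.Dict Int (PySem.Set Int)) (k : Int) (d : PySem.Set Int) :
    (xs.foldl (fun o it => if o.contains it then o else o.insert it (g it)) o).getD k d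
      = if o.contains k = false ∧ k ∈ xs then g k else o.getD k d := by
  induction xs generalizing o with
  | nil => simp
  | cons h t ih =>
    simp only [List.foldl_cons]
    by_cases hc : o.contains h
    · rw [if_pos hc, ih]
      by_cases hk : k = h
      · subst hk; simp [hc]
      · simp [List.mem_cons, hk]
    · rw [if_neg hc, ih]
      by_cases hk : k = h
      · subst hk
        have hc' : o.contains k = false := by
          cases hcc : o.contains k
          · rfl
          · exact absurd hcc hc
        simp [PySem.Dict.contains_insert_self, PySem.Dict.getD_insert_self, hc']
      · rw [PySem.Dict.contains_insert, PySem.Dict.getD_insert]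
        simp [List.mem_cons, hk, show (k == h) = false by simp [hk]]

-- index list of the records (as sets) containing x, indices starting at n
def pvIdx (rs : List (PySem.Set Int)) (n : Int) (x : Int) : List Int :=
  ((PySem.List.enumerate rs n).filter (fun p => p.2.contains x)).map (fun p => p.1)

theorem pvIdx_cons (s : PySem.Set Int) (rs : List (PySem.Set Int)) (n x : Int) :
    pvIdx (s :: rs) n x = (if s.contains x then [n] else []) ++ pvIdx rs (n + 1) x := by
  unfold pvIdx
  rw [PySem.List.enumerate_cons, List.filter_cons]
  by_cases h : x ∈ s <;> simp [h, PySem.Set.contains_iff]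

theorem pvIdx_ge (rs : List (PySem.Set Int)) (n x m : Int) (hm : m ∈ pvIdx rs n x) : n ≤ m := by
  induction rs generalizing n with
  | nil => simp [pvIdx, PySem.List.enumerate_nil] at hm
  | cons s rs ih =>
    rw [pvIdx_cons] at hm
    rcases List.mem_append.mp hm with h | h
    · split at h <;> simp at h
      omega
    · have := ih (n + 1) h; omega

theorem lem_inter_def (u t : PySem.Set Int) :
    PySem.Set.inter u t = u.filter (fun x => t.contains x) := rfl

theorem lem_inter_count (rs : List (PySem.Set Int)) (n a b : Int) :
    (PySem.Set.inter (pvIdx rs n a) (pvIdx rs n b)).length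
      = rs.countP (fun s => s.contains a && s.contains b) := by
  induction rs generalizing n with
  | nil => simp [pvIdx, PySem.List.enumerate_nil, lem_inter_def]
  | cons s rs ih =>
    simp only [lem_inter_def] at ih ⊢
    rw [pvIdx_cons, pvIdx_cons, List.filter_append, List.length_append, List.countP_cons]
    have htail : (pvIdx rs (n + 1) a).filter
          (fun x => PySem.Set.contains ((if s.contains b then [n] else []) ++ pvIdx rs (n + 1) b) x)
        = (pvIdx rs (n + 1) a).filter (fun x => PySem.Set.contains (pvIdx rs (n + 1) b) x) := by
      refine List.filter_congr (fun m hm => ?_)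
      have h1 : n + 1 ≤ m := pvIdx_ge rs (n + 1) a m hm
      by_cases hb : s.contains b = true
      · simp only [if_pos hb]
        rw [Bool.eq_iff_iff]
        simp only [PySem.Set.contains_iff, List.mem_append, List.mem_singleton]
        constructor
        · rintro (rfl | h)
          · omega
          · exact h
        · exact fun h => Or.inr h
      · simp only [if_neg hb, List.nil_append]
    rw [htail, ih]
    have hnb : n ∉ pvIdx rs (n + 1) b := fun hc => by have := pvIdx_ge rs (n + 1) b n hc; omega
    have hhead : ((if s.contains a then [n] else []).filter
          (fun x => PySem.Set.contains ((if s.contains b then [n] else []) ++ pvIdx rs (n + 1) b) x)).length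
        = if (s.contains a && s.contains b) then 1 else 0 := by
      by_cases has : a ∈ s <;> by_cases hbs : b ∈ s <;>
        simp [List.filter_cons, has, hbs, hnb, PySem.Set.contains_iff]
    rw [hhead]
    by_cases hab : (s.contains a && s.contains b) = true <;> simp [hab, Nat.add_comm]

def pvCnt (records : List (List Int)) (key : List Int) : Int :=
  ((records.countP (fun j => key.all (fun x => decide (x ∈ j)))) : Int)

theorem lem_contains_ofList (j : List Int) (x : Int) :
    (PySem.Set.ofList j).contains x = decide (x ∈ j) := by
  by_cases h : x ∈ j
  · simp [h, PySem.Set.contains_iff, PySem.Set.mem_ofList]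
  · rw [Bool.eq_iff_iff]
    simp [h, PySem.Set.contains_iff, PySem.Set.mem_ofList]

theorem lem_filter_fold (l : List (List Int × Int)) (thresh : Int) (hnd : (l.map Prod.fst).Nodup) :
    (l.foldl (fun fin kv => if kv.2 ≥ thresh then fin.insert kv.1 kv.2 else fin) PySem.Dict.empty).items
      = l.filter (fun kv => decide (kv.2 ≥ thresh)) := by
  have h1 : (fun (fin : PySem.Dict (List Int) Int) (kv : List Int × Int) => if kv.2 ≥ thresh then fin.insert kv.1 kv.2 else fin)
      = (fun fin kv => if (fun (kv : List Int × Int) => decide (kv.2 ≥ thresh)) kv = true then fin.insert kv.1 kv.2 else fin) := by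
    funext fin kv
    by_cases h : kv.2 ≥ thresh <;> simp [h]
  rw [h1, ← List.foldl_filter]
  rw [PySem.Dict.items_foldl_insert_fresh _ Prod.fst Prod.snd _ (by simp)
    ((List.Sublist.map Prod.fst (List.filter_sublist (l := l))).nodup hnd)]
  simp [show (PySem.Dict.empty : PySem.Dict (List Int) Int).items = [] from rfl]

theorem lem_G (ks : List (List Int)) (f : List Int → Int) (thresh : Int) :
    (ks.foldl (fun (d : PySem.Dict (List Int) Int) k => if f k ≥ thresh then d.insert k (f k) else d) PySem.Dict.empty).items
      = ((PySem.Set.ofList ks).filter (fun k => decide (f k ≥ thresh))).map (fun k => (k, f k)) := by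
  have h1 : (fun (d : PySem.Dict (List Int) Int) k => if f k ≥ thresh then d.insert k (f k) else d)
      = (fun d k => if (fun k => decide (f k ≥ thresh)) k = true then d.insert k (f k) else d) := by
    funext d k
    by_cases h : f k ≥ thresh <;> simp [h]
  rw [h1, ← List.foldl_filter, lem_H, lem_ofList_filter]

theorem lemA (final1 records : List (List Int)) (thresh : Int) :
    iter2 final1 records thresh
      = ((PySem.Set.ofList ((PySem.List.combinations (final1.map (fun x => x.headD 0)) 2).map
            (fun i => PySem.List.sorted i (fun x => x) false))).filter
          (fun k => decide (pvCnt records k ≥ thresh))).map (fun k => (k, pvCnt records k)) := by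
  unfold iter2
  dsimp only
  have hstep : ∀ (c : PySem.Dict (List Int) Int) (i : List Int),
      i ∈ PySem.List.combinations (final1.map (fun x => x.headD 0)) 2 →
      (records.foldl (fun cand j =>
          if PySem.Set.issubset (PySem.Set.ofList i) (PySem.Set.ofList j) then
            cand.modify (PySem.List.sorted i (fun x => x) false) 0 (· + 1)
          else cand) (c.insert (PySem.List.sorted i (fun x => x) false) 0))
      = c.insert (PySem.List.sorted i (fun x => x) false)
          (pvCnt records (PySem.List.sorted i (fun x => x) false)) := by
    intro c i hi
    obtain ⟨a, b, rfl, _, _⟩ := lem_pair _ _ hi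
    rw [show (fun (cand : PySem.Dict (List Int) Int) j =>
          if PySem.Set.issubset (PySem.Set.ofList [a, b]) (PySem.Set.ofList j) then
            cand.modify (PySem.List.sorted [a, b] (fun x => x) false) 0 (· + 1)
          else cand)
        = (fun cand j =>
          if (fun j => PySem.Set.issubset (PySem.Set.ofList [a, b]) (PySem.Set.ofList j)) j = true then
            (fun (cand : PySem.Dict (List Int) Int) (_ : List Int) =>
              cand.modify (PySem.List.sorted [a, b] (fun x => x) false) 0 (· + 1)) cand j
          else cand) from rfl]
    rw [← List.foldl_filter, lem_inner]
    congr 1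
    rw [zero_add, ← List.countP_eq_length_filter]
    unfold pvCnt
    congr 1
    refine List.countP_congr (fun j _ => ?_)
    rw [lem_issubset, lem_sorted_pair, lem_all_pair]
  rw [PySem.List.foldl_congr_mem _ _
      (fun c i => c.insert (PySem.List.sorted i (fun x => x) false)
        (pvCnt records (PySem.List.sorted i (fun x => x) false))) _
      (fun c i hi => hstep c i hi)]
  rw [← List.foldl_map (f := fun i => PySem.List.sorted i (fun x => x) false)
      (g := fun (d : PySem.Dict (List Int) Int) k => d.insert k (pvCnt records k))]
  rw [lem_H, lem_filter_fold _ _ (by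
      rw [List.map_map, show (Prod.fst ∘ fun (k : List Int) => (k, pvCnt records k)) = id from rfl, List.map_id]
      exact PySem.Set.nodup_ofList _)]
  rw [List.filter_map]
  rfl

theorem lem_cnt_pair (records : List (List Int)) (a b : Int) :
    ((PySem.Set.inter (pvIdx (records.map (fun r => PySem.Set.ofList r)) 0 a)
        (pvIdx (records.map (fun r => PySem.Set.ofList r)) 0 b)).length : Int)
      = pvCnt records (PySem.List.sorted [a, b] (fun x => x) false) := by
  rw [lem_inter_count, List.countP_map]
  unfold pvCnt
  congr 1
  refine List.countP_congr (fun j _ => ?_)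
  simp only [Function.comp_apply, lem_contains_ofList]
  rw [lem_sorted_pair, lem_all_pair]

theorem lemB (final1 records : List (List Int)) (thresh : Int) :
    iter2_alt final1 records thresh
      = ((PySem.Set.ofList ((PySem.List.combinations (final1.map (fun x => x.headD 0)) 2).map
            (fun i => PySem.List.sorted i (fun x => x) false))).filter
          (fun k => decide (pvCnt records k ≥ thresh))).map (fun k => (k, pvCnt records k)) := by
  unfold iter2_alt
  dsimp only
  have hocc : ∀ k ∈ final1.map (fun x => x.headD 0),
      ((final1.map (fun x => x.headD 0)).foldl
        (fun (occ : PySem.Dict Int (PySem.Set Int)) item =>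
          if occ.contains item then occ
          else occ.insert item
            (((PySem.List.enumerate (records.map (fun r => PySem.Set.ofList r))).filter
              (fun p => p.2.contains item)).map (fun p => p.1)))
        PySem.Dict.empty).getD k []
      = pvIdx (records.map (fun r => PySem.Set.ofList r)) 0 k := by
    intro k hk
    rw [lem_occ]
    rw [if_pos ⟨by simp, hk⟩]
    rfl
  rw [PySem.List.foldl_congr_mem _ _
      (fun (out : PySem.Dict (List Int) Int) i =>
        if pvCnt records (PySem.List.sorted i (fun x => x) false) ≥ thresh then
          out.insert (PySem.List.sorted i (fun x => x) false)
            (pvCnt records (PySem.List.sorted i (fun x => x) false))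
        else out) _
      (fun out i hi => by
        obtain ⟨a, b, rfl, ha, hb⟩ := lem_pair _ _ hi
        dsimp only
        rw [hocc a ha, hocc b hb, lem_cnt_pair records a b, lem_sorted_pair])]
  rw [← List.foldl_map (f := fun i => PySem.List.sorted i (fun x => x) false)
      (g := fun (d : PySem.Dict (List Int) Int) k =>
        if pvCnt records k ≥ thresh then d.insert k (pvCnt records k) else d)]
  rw [lem_G]

-- ===== VERDICT (by name: the statement is the Claim_ definition above) =====
theorem iter2_spec : Claim_equal_iter2 := by
  intro final1 records thresh _ _
  unfold Spec_iter2
  rw [lemA, lemB]
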